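-- pv_equiv track=rewrite | github.com/kehuo/NLP-seg | nlp_seg/common/data.py | gen_seg_train_data
-- ===== SOURCE A (Python) =====
-- def gen_seg_train_data(x_train, y_train):
--     x1_train, y1_train = [], []
--     line_dict = []
--     idx = 0
--     for l1, l2 in zip(x_train, y_train):
--         idx += 1
--         x_line = ''
--         y_line = ''
--         for x, y in zip(l1.split(' '), l2.split(' ')):
--             if x_line != '':
--                 x_line += ' '
--                 y_line += ' '
--             x_line += x
--             y_line += y
--             if y == 'VS':
--                 if x_line not in line_dict:
--                     line_dict.append(x_line)
--                     x1_train.append(x_line)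
--                     y1_train.append(y_line)
--                 x_line = ''
--                 y_line = ''
--     return x1_train, y1_train
-- ===== SOURCE B (Python) =====
-- def gen_seg_train_data(x_train, y_train):
--     # Pass 1: cut each zipped token stream at y == 'VS' into rendered
--     # candidate segments (a trailing buffer that never reaches 'VS' is dropped).
--     candidates = []
--     for l1, l2 in zip(x_train, y_train):
--         x_buf, y_buf = [], []
--         for x, y in zip(l1.split(' '), l2.split(' ')):
--             x_buf.append(x)
--             y_buf.append(y)
--             if y == 'VS':
--                 candidates.append((' '.join(x_buf), ' '.join(y_buf)))
--                 x_buf, y_buf = [], []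
--     # Pass 2: keep the first occurrence of each x-segment, tracked with a set.
--     xs, ys, seen = [], [], set()
--     for xseg, yseg in candidates:
--         if xseg not in seen:
--             seen.add(xseg)
--             xs.append(xseg)
--             ys.append(yseg)
--     return xs, ys
-- ===== Notes on version B (the rewrite author's own statement) =====
-- stated objective: alternative
-- what changed: A's single interleaved loop that grows x_line/y_line strings with conditional spaces and deduplicates via a linear 'not in line_dict' scan is replaced by two passes: pass 1 cuts each zipped token stream at y=='VS' into a flat candidates list rendered with ' '.join, pass 2 scans the candidates once keeping the first occurrence of each x-segment via a hash set; …
-- outside the precondition, e.g. on gen_seg_train_data([' a'], ['B VS']): A returns (['a'], ['BVS']), B returns ([' a'], ['B VS'])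
import Mathlib
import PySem

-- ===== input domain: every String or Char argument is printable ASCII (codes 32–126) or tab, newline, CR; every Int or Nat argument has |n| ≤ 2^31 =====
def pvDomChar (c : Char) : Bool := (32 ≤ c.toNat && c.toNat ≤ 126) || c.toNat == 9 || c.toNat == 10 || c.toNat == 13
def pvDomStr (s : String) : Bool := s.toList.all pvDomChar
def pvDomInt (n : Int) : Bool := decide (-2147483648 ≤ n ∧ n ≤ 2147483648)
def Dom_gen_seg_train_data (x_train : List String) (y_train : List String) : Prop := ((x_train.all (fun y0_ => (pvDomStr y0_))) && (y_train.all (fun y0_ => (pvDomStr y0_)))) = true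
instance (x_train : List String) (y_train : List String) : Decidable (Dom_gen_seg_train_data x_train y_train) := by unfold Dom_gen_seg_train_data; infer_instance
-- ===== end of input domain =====

-- B replaces A's single interleaved loop (conditional-space string accumulators + linear
-- list-membership dedup) by two passes: cut each line into ' '.join-rendered candidate
-- segments, then one dedup pass with a set.

-- ===== PORT A =====
-- zip(l1.split(' '), l2.split(' ')) — shared tokenisation of a line pair (both Pythons write it verbatim)
def pvPairs (l1 l2 : String) : List (List Char × List Char) :=
  List.zip (PySem.Chars.splitOn l1.toList [' ']) (PySem.Chars.splitOn l2.toList [' '])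

-- A's inner 'for x, y in zip(...)' loop: state (x_line, y_line, line_dict, x1_train, y1_train)
def pyA_inner (xl yl : List Char) (ld : List (List Char)) (a b : List String) :
    List (List Char × List Char) → List (List Char) × List String × List String
  | [] => (ld, a, b)
  | (x, y) :: rest =>
    let xl1 := if xl = [] then xl else xl ++ [' ']
    let yl1 := if xl = [] then yl else yl ++ [' ']
    let xl2 := xl1 ++ x
    let yl2 := yl1 ++ y
    if y = ['V', 'S'] then
      if xl2 ∈ ld then pyA_inner [] [] ld a b rest
      else pyA_inner [] [] (ld ++ [xl2]) (a ++ [String.ofList xl2]) (b ++ [String.ofList yl2]) rest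
    else pyA_inner xl2 yl2 ld a b rest

def gen_seg_train_data (x_train : List String) (y_train : List String) : List String × List String :=
  -- (A's 'idx' counter is dead code and is not carried)
  let r := (List.zip x_train y_train).foldl
    (fun st p => pyA_inner [] [] st.1 st.2.1 st.2.2 (pvPairs p.1 p.2)) ([], [], [])
  (r.2.1, r.2.2)

-- ===== PORT B =====
-- (' '.join(x_buf), ' '.join(y_buf))
def pvRender (xb yb : List (List Char)) : List Char × List Char :=
  (PySem.Chars.join [' '] xb, PySem.Chars.join [' '] yb)

-- pass 1 inner loop: buffer tokens, emit a rendered candidate at every y == 'VS'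
def pvCands (xb yb : List (List Char)) :
    List (List Char × List Char) → List (List Char × List Char)
  | [] => []
  | (x, y) :: rest =>
    let xb' := xb ++ [x]
    let yb' := yb ++ [y]
    if y = ['V', 'S'] then pvRender xb' yb' :: pvCands [] [] rest
    else pvCands xb' yb' rest

-- pass 2: first occurrence of each x-segment wins, tracked with a set
def pvDedupGo (st : PySem.Set (List Char) × List String × List String) :
    List (List Char × List Char) → PySem.Set (List Char) × List String × List String
  | [] => st
  | (xseg, yseg) :: rest =>
    if PySem.Set.contains st.1 xseg then pvDedupGo st rest
    else pvDedupGo (PySem.Set.add st.1 xseg, st.2.1 ++ [String.ofList xseg], st.2.2 ++ [String.ofList yseg]) rest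

def gen_seg_train_data_alt (x_train : List String) (y_train : List String) : List String × List String :=
  let cands := (List.zip x_train y_train).foldl
    (fun acc p => acc ++ pvCands [] [] (pvPairs p.1 p.2)) []
  let r := pvDedupGo (PySem.Set.empty, [], []) cands
  (r.2.1, r.2.2)

-- ===== PRECONDITION & SPEC =====
-- no empty x-token at a segment start (position 0 or right after a y-token 'VS') of a
-- zipped token stream, when that segment still reaches a later 'VS'
def pvIdxOk (s : Bool) (ps : List (List Char × List Char)) : Prop :=
  (∀ j < ps.length,
    (s = true ∧ 0 < j ∧ (ps[0]!).1 = [] ∧ (ps[0]!).2 ≠ ['V', 'S']) → (ps[j]!).2 ≠ ['V', 'S'])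
  ∧ (∀ i < ps.length, ∀ j < ps.length,
    (0 < i ∧ i < j ∧ (ps[i-1]!).2 = ['V', 'S'] ∧ (ps[i]!).1 = [] ∧ (ps[i]!).2 ≠ ['V', 'S']) →
    (ps[j]!).2 ≠ ['V', 'S'])

-- Pre_ excludes inputs where some line pair's zipped token stream has an empty x-token
-- opening a segment that later reaches a 'VS': there A's conditional-space concatenation
-- and B's ' '.join are two equally defensible renderings of a degenerate token stream.
def Pre_gen_seg_train_data (x_train : List String) (y_train : List String) : Prop :=
  ∀ p ∈ List.zip x_train y_train, pvIdxOk true (pvPairs p.1 p.2)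
instance (x_train : List String) (y_train : List String) : Decidable (Pre_gen_seg_train_data x_train y_train) := by
  unfold Pre_gen_seg_train_data
  have h : ∀ ps, Decidable (pvIdxOk true ps) := fun ps => by
    unfold pvIdxOk
    refine @instDecidableAnd _ _ ?_ ?_ <;> infer_instance
  exact @List.decidableBAll (String × String) (fun p => pvIdxOk true (pvPairs p.1 p.2))
    (fun p => h (pvPairs p.1 p.2)) (List.zip x_train y_train)
def pvWitness_gen_seg_train_data : List String × List String := (["a b", "a b"], ["c VS", "d VS"])

def Spec_gen_seg_train_data (x_train : List String) (y_train : List String) (out : List String × List String) : Prop := out = gen_seg_train_data_alt x_train y_train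
instance (x_train : List String) (y_train : List String) (out : List String × List String) : Decidable (Spec_gen_seg_train_data x_train y_train out) := by unfold Spec_gen_seg_train_data; infer_instance

-- ===== CLAIM (what is proved, stated in full; the proofs are below) =====
def Claim_equal_gen_seg_train_data : Prop := ∀ (x_train : List String) (y_train : List String), Dom_gen_seg_train_data x_train y_train → Pre_gen_seg_train_data x_train y_train → Spec_gen_seg_train_data x_train y_train (gen_seg_train_data x_train y_train)

-- ===== LEMMAS AND PROOFS =====

-- no y-token of the stream is 'VS'
def pvNoVS (ps : List (List Char × List Char)) : Prop := ∀ p ∈ ps, p.2 ≠ ['V', 'S']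

-- recursive form of pvIdxOk, the invariant the inner-loop induction threads
def pvOk : Bool → List (List Char × List Char) → Prop
  | _, [] => True
  | s, (x, y) :: r => ((s = true ∧ x = [] ∧ y ≠ ['V', 'S']) → pvNoVS r) ∧ pvOk (decide (y = ['V', 'S'])) r

theorem pvIdxOk_head (s : Bool) (x y : List Char) (r : List (List Char × List Char))
    (h : pvIdxOk s ((x, y) :: r)) (hs : s = true) (hx : x = []) (hy : y ≠ ['V', 'S']) :
    pvNoVS r := by
  intro p hp
  obtain ⟨j, hj, hpj⟩ := List.getElem_of_mem hp
  have := h.1 (j + 1) (by simp; omega)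
    ⟨hs, by omega, by simp [hx],
     by simpa [List.getElem!_eq_getElem?_getD] using hy⟩
  simpa [List.getElem!_eq_getElem?_getD, List.getElem?_eq_getElem hj, hpj] using this

theorem pvIdxOk_cons (s : Bool) (x y : List Char) (r : List (List Char × List Char))
    (h : pvIdxOk s ((x, y) :: r)) : pvIdxOk (decide (y = ['V', 'S'])) r := by
  constructor
  · intro j hj hant
    obtain ⟨hs, hj0, h0x, h0y⟩ := hant
    have hy' : y = ['V', 'S'] := of_decide_eq_true hs
    have := h.2 1 (by simp; omega) (j + 1) (by simp; omega)
      ⟨by omega, by omega, by simp [hy'],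
       by simpa [List.getElem!_eq_getElem?_getD] using h0x,
       by simpa [List.getElem!_eq_getElem?_getD] using h0y⟩
    simpa [List.getElem!_eq_getElem?_getD] using this
  · intro i hi j hj hant
    obtain ⟨hi0, hij, hprev, hxi, hyi⟩ := hant
    obtain ⟨k, rfl⟩ : ∃ k, i = k + 1 := ⟨i - 1, by omega⟩
    have := h.2 (k + 2) (by simp; omega) (j + 1) (by simp; omega)
      ⟨by omega, by omega, by simpa [List.getElem!_eq_getElem?_getD] using hprev,
       by simpa [List.getElem!_eq_getElem?_getD] using hxi,
       by simpa [List.getElem!_eq_getElem?_getD] using hyi⟩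
    simpa [List.getElem!_eq_getElem?_getD] using this

theorem pvOk_of_idx (ps : List (List Char × List Char)) :
    ∀ s : Bool, pvIdxOk s ps → pvOk s ps := by
  induction ps with
  | nil => intro s _; trivial
  | cons p r ih =>
    intro s h
    obtain ⟨x, y⟩ := p
    exact ⟨fun ⟨hs, hx, hy⟩ => pvIdxOk_head s x y r h hs hx hy,
           ih _ (pvIdxOk_cons s x y r h)⟩

theorem join_cons_cons_ne_nil (t u : List Char) (v : List (List Char)) :
    PySem.Chars.join [' '] (t :: u :: v) ≠ [] := by
  rw [PySem.Chars.join_cons_cons]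
  cases t <;> simp

theorem join_eq_nil_iff (xb : List (List Char)) :
    PySem.Chars.join [' '] xb = [] ↔ xb = [] ∨ xb = [[]] := by
  match xb with
  | [] => simp [PySem.Chars.join_nil]
  | [t] => simp [PySem.Chars.join_singleton]
  | t :: u :: v => simp [join_cons_cons_ne_nil t u v]

theorem join_append_singleton (sep x : List Char) (l : List (List Char)) (hl : l ≠ []) :
    PySem.Chars.join sep (l ++ [x]) = PySem.Chars.join sep l ++ sep ++ x := by
  induction l with
  | nil => simp at hl
  | cons t r ih =>
    cases r with
    | nil =>
      rw [List.cons_append, List.nil_append, PySem.Chars.join_cons_cons,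
        PySem.Chars.join_singleton, PySem.Chars.join_singleton]
    | cons u v =>
      have h1 : (t :: u :: v) ++ [x] = t :: ((u :: v) ++ [x]) := by simp
      have h2 : (u :: v) ++ [x] = u :: (v ++ [x]) := by simp
      rw [h1, h2, PySem.Chars.join_cons_cons, ← h2, ih (by simp),
        PySem.Chars.join_cons_cons]
      simp

-- extending the buffer is A's conditional-space concatenation, provided the buffer is not
-- the lone empty token (the only buffer whose join is empty while A's rule says 'nonempty')
theorem render_snoc (xb yb : List (List Char)) (x y : List Char)
    (hlen : xb.length = yb.length) (hxb : xb ≠ [[]]) :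
    pvRender (xb ++ [x]) (yb ++ [y]) =
      ((if (pvRender xb yb).1 = [] then (pvRender xb yb).1 else (pvRender xb yb).1 ++ [' ']) ++ x,
       (if (pvRender xb yb).1 = [] then (pvRender xb yb).2 else (pvRender xb yb).2 ++ [' ']) ++ y) := by
  cases xb with
  | nil =>
    have hyb : yb = [] := by simpa using hlen.symm
    subst hyb
    simp [pvRender, PySem.Chars.join_nil, PySem.Chars.join_singleton]
  | cons t r =>
    have hx : PySem.Chars.join [' '] (t :: r) ≠ [] := by
      intro h
      rcases (join_eq_nil_iff (t :: r)).1 h with h' | h' <;> simp_all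
    have hyb : yb ≠ [] := by
      intro h; subst h; simp at hlen
    simp only [pvRender, join_append_singleton [' '] x (t :: r) (by simp),
      join_append_singleton [' '] y yb hyb, if_neg hx]

theorem render_snoc_fst (xb yb : List (List Char)) (x y : List Char)
    (hlen : xb.length = yb.length) (hxb : xb ≠ [[]]) :
    (pvRender (xb ++ [x]) (yb ++ [y])).1 =
      (if (pvRender xb yb).1 = [] then (pvRender xb yb).1 else (pvRender xb yb).1 ++ [' ']) ++ x := by
  rw [render_snoc xb yb x y hlen hxb]

theorem render_snoc_snd (xb yb : List (List Char)) (x y : List Char)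
    (hlen : xb.length = yb.length) (hxb : xb ≠ [[]]) :
    (pvRender (xb ++ [x]) (yb ++ [y])).2 =
      (if (pvRender xb yb).1 = [] then (pvRender xb yb).2 else (pvRender xb yb).2 ++ [' ']) ++ y := by
  rw [render_snoc xb yb x y hlen hxb]

theorem pvRender_nil : pvRender [] [] = ([], []) := by
  simp [pvRender, PySem.Chars.join_nil]

theorem set_contains_iff (s : PySem.Set (List Char)) (x : List Char) :
    PySem.Set.contains s x = true ↔ x ∈ s := by
  simp [PySem.Set.contains]

theorem set_add_not_mem (s : PySem.Set (List Char)) (x : List Char) (h : x ∉ s) :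
    PySem.Set.add s x = s ++ [x] := by
  simp [PySem.Set.add, PySem.Set.contains, h]

-- with no 'VS' in the stream, A's inner loop only buffers and emits nothing
theorem pyA_inner_noVS (ps : List (List Char × List Char)) :
    ∀ (xl yl : List Char) (ld : List (List Char)) (a b : List String),
    pvNoVS ps → pyA_inner xl yl ld a b ps = (ld, a, b) := by
  induction ps with
  | nil => intro xl yl ld a b _; rfl
  | cons p rest ih =>
    intro xl yl ld a b h
    obtain ⟨x, y⟩ := p
    simp only [pyA_inner, if_neg (h (x, y) (by simp))]
    exact ih _ _ ld a b (fun q hq => h q (by simp [hq]))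

-- with no 'VS' in the stream, B's pass 1 emits no candidate
theorem pvCands_noVS (ps : List (List Char × List Char)) :
    ∀ (xb yb : List (List Char)), pvNoVS ps → pvCands xb yb ps = [] := by
  induction ps with
  | nil => intro xb yb _; rfl
  | cons p rest ih =>
    intro xb yb h
    obtain ⟨x, y⟩ := p
    simp only [pvCands, if_neg (h (x, y) (by simp))]
    exact ih _ _ (fun q hq => h q (by simp [hq]))

-- A's interleaved inner loop = render-segments then dedup, from any aligned buffer,
-- under the pvOk invariant (a lone-empty-token buffer never reaches another 'VS')
theorem inner_eq (ps : List (List Char × List Char)) :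
    ∀ (xb yb : List (List Char)) (ld : List (List Char)) (a b : List String),
    xb.length = yb.length → (xb = [[]] → pvNoVS ps) → pvOk xb.isEmpty ps →
    pyA_inner (pvRender xb yb).1 (pvRender xb yb).2 ld a b ps
      = pvDedupGo (ld, a, b) (pvCands xb yb ps) := by
  induction ps with
  | nil => intro xb yb ld a b _ _ _; rfl
  | cons p rest ih =>
    intro xb yb ld a b hlen hdeg hok
    by_cases hbuf : xb = [[]]
    · rw [pyA_inner_noVS _ _ _ ld a b (hdeg hbuf), pvCands_noVS _ _ _ (hdeg hbuf)]
      rfl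
    · obtain ⟨x, y⟩ := p
      obtain ⟨hok1, hok2⟩ := hok
      have hlen' : (xb ++ [x]).length = (yb ++ [y]).length := by simp [hlen]
      simp only [pyA_inner, pvCands]
      rw [← render_snoc_fst xb yb x y hlen hbuf, ← render_snoc_snd xb yb x y hlen hbuf]
      by_cases hy : y = ['V', 'S']
      · rw [if_pos hy, if_pos hy]
        have hok' : pvOk (List.isEmpty ([] : List (List Char))) rest := by
          simpa [hy] using hok2
        simp only [pvDedupGo]
        by_cases hmem : (pvRender (xb ++ [x]) (yb ++ [y])).1 ∈ ld
        · rw [if_pos hmem, if_pos ((set_contains_iff ld _).2 hmem)]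
          have h0 := ih [] [] ld a b rfl (by simp) hok'
          rw [pvRender_nil] at h0
          exact h0
        · rw [if_neg hmem, if_neg (by rw [set_contains_iff]; exact hmem)]
          have h0 := ih [] [] (ld ++ [(pvRender (xb ++ [x]) (yb ++ [y])).1])
            (a ++ [String.ofList (pvRender (xb ++ [x]) (yb ++ [y])).1])
            (b ++ [String.ofList (pvRender (xb ++ [x]) (yb ++ [y])).2]) rfl (by simp) hok'
          rw [pvRender_nil] at h0
          rw [set_add_not_mem ld _ hmem]
          exact h0
      · rw [if_neg hy, if_neg hy]
        have hdeg' : xb ++ [x] = [[]] → pvNoVS rest := by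
          intro h
          have hx0 : xb = [] ∧ x = [] := by
            cases xb with
            | nil => simpa using h
            | cons t r =>
              exact absurd (congrArg List.length h) (by simp)
          exact hok1 ⟨by simp [hx0.1], hx0.2, hy⟩
        have hok' : pvOk (xb ++ [x]).isEmpty rest := by
          rw [show (xb ++ [x]).isEmpty = false by simp]
          simpa [hy] using hok2
        exact ih (xb ++ [x]) (yb ++ [y]) ld a b hlen' hdeg' hok'

theorem dedupGo_append (l1 l2 : List (List Char × List Char)) :
    ∀ st, pvDedupGo st (l1 ++ l2) = pvDedupGo (pvDedupGo st l1) l2 := by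
  induction l1 with
  | nil => intro st; rfl
  | cons c cs ih =>
    intro st
    obtain ⟨xseg, yseg⟩ := c
    simp only [List.cons_append, pvDedupGo]
    split_ifs <;> apply ih

theorem cands_foldl (f : String × String → List (List Char × List Char)) (lines : List (String × String)) :
    ∀ acc, lines.foldl (fun a p => a ++ f p) acc = acc ++ lines.flatMap f := by
  induction lines with
  | nil => intro acc; simp
  | cons p rest ih => intro acc; rw [List.foldl_cons, ih, List.flatMap_cons]; simp

theorem outer_eq (lines : List (String × String))
    (hlines : ∀ q ∈ lines, pvOk true (pvPairs q.1 q.2)) :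
    ∀ (st : List (List Char) × List String × List String),
    lines.foldl (fun st p => pyA_inner [] [] st.1 st.2.1 st.2.2 (pvPairs p.1 p.2)) st
      = pvDedupGo st (lines.foldl (fun acc p => acc ++ pvCands [] [] (pvPairs p.1 p.2)) []) := by
  induction lines with
  | nil => intro st; rfl
  | cons p rest ih =>
    intro st
    obtain ⟨ld, a, b⟩ := st
    have hrest : ∀ q ∈ rest, pvOk true (pvPairs q.1 q.2) := fun q hq => hlines q (by simp [hq])
    have hinner := inner_eq (pvPairs p.1 p.2) [] [] ld a b rfl (by simp)
      (by simpa using hlines p (by simp))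
    rw [pvRender_nil] at hinner
    rw [List.foldl_cons, List.foldl_cons, ih hrest,
      cands_foldl (fun p => pvCands [] [] (pvPairs p.1 p.2)) rest,
      cands_foldl (fun p => pvCands [] [] (pvPairs p.1 p.2)) rest,
      List.nil_append, dedupGo_append,
      show pyA_inner [] [] (ld, a, b).1 (ld, a, b).2.1 (ld, a, b).2.2 (pvPairs p.1 p.2)
          = pvDedupGo (ld, a, b) (pvCands [] [] (pvPairs p.1 p.2)) from hinner]
    simp

-- ===== VERDICT (by name: the statement is the Claim_ definition above) =====
theorem gen_seg_train_data_spec : Claim_equal_gen_seg_train_data := by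
  intro x_train y_train _ hpre
  unfold Spec_gen_seg_train_data gen_seg_train_data gen_seg_train_data_alt
  rw [outer_eq]
  · rfl
  · exact fun q hq => pvOk_of_idx _ true (hpre q hq)
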